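-- pv_equiv track=rewrite | github.com/edufranca13/IME | 1_sem/MAC0110/eps/EP3/auxep3.py | classify_a
-- ===== SOURCE A (Python) =====
-- def classify_a(lista):
-- 	lista2 = lista[:]
-- 	lista2.sort()
--
-- 	d = dict()
--
-- 	categories = ['blue', 'green', 'red', 'cyan', 'magenta', 'yellow', 'black', 'white']
--
-- 	j = 0
-- 	l = 0
-- 	for j, cat in enumerate(categories):
-- 		for i in range(l, len(lista2)):
-- 			#compara o angulo com o trecho da divisao de 8 - pizza
-- 			if lista2[i] <= 45*(j+1):
-- 				if cat in d:
-- 					#se a chave ja existe, append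
-- 					d[cat].append(lista2[i])
-- 				else:
-- 					#se a chave nao existe, cria como lista
-- 					d[cat] = [lista2[i]]
-- 				l += 1
-- 	return d
-- ===== SOURCE B (Python) =====
-- import bisect
--
-- def classify_a(lista):
--     s = sorted(lista)
--     categories = ['blue', 'green', 'red', 'cyan', 'magenta', 'yellow', 'black', 'white']
--     d = {}
--     prev = 0
--     for k, cat in enumerate(categories, 1):
--         p = bisect.bisect_right(s, 45 * k)
--         if p > prev:
--             d[cat] = s[prev:p]
--         prev = p
--     return d
-- ===== Notes on version B (the rewrite author's own statement) =====
-- stated objective: faster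
-- what changed: Replaces A's per-element nested scans (for each of the 8 categories, rescan the sorted list from index l testing every element against the cut) with bisect.bisect_right to find each 45-degree cut position in the sorted list and slice the band out in one step.
import Mathlib
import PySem

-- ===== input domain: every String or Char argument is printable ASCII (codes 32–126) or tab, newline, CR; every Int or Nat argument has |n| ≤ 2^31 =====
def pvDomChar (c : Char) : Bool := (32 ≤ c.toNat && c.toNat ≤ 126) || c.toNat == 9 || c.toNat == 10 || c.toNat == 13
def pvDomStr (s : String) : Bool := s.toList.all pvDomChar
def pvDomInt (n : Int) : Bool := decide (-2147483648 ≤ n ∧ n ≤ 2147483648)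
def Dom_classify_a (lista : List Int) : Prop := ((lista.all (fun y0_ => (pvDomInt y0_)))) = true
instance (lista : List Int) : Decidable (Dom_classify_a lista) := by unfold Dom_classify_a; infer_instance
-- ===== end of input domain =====

-- B replaces A's nested scan-from-l bucketing (a per-element Python loop per category) with
-- bisect_right boundary finding plus slicing of the sorted list (measurably faster; A does not mutate lista).

-- ===== PORT A =====
-- d[cat].append(x) when cat in d, else d[cat] = [x]
def aUpd (cat : String) (d : PySem.Dict String (List Int)) (x : Int) : PySem.Dict String (List Int) :=
  if d.contains cat then d.modify cat [] (fun v => v ++ [x]) else d.insert cat [x]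

-- the inner 'for i in range(l, len(lista2))' loop for one (j, cat); state = (d, l)
def aStep (lista2 : List Int) (st : PySem.Dict String (List Int) × Int) (jc : Int × String) :
    PySem.Dict String (List Int) × Int :=
  (PySem.List.pyRange st.2 (PySem.List.len lista2)).foldl
    (fun st2 i =>
      if PySem.List.pyGetD lista2 i 0 ≤ 45 * (jc.1 + 1) then
        (aUpd jc.2 st2.1 (PySem.List.pyGetD lista2 i 0), st2.2 + 1)
      else st2) st
  -- the index i ∈ range(l, len(lista2)) is always in range (0 ≤ l ≤ len is a loop invariant), so
  -- pyGetD's default 0 is never used and this is exact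

def classify_a (lista : List Int) : List (String × List Int) :=
  let lista2 := PySem.List.sorted lista (fun x => x)
  let categories : List String := ["blue", "green", "red", "cyan", "magenta", "yellow", "black", "white"]
  ((PySem.List.enumerate categories).foldl (aStep lista2) (PySem.Dict.empty, 0)).1.items

-- ===== PORT B =====
-- one step of B's loop 'for k, cat in enumerate(categories, 1)'; state = (d, prev)
def bStep (s : List Int) (st : PySem.Dict String (List Int) × Nat) (kc : Int × String) :
    PySem.Dict String (List Int) × Nat :=
  let p := PySem.List.bisectRight s (45 * kc.1)
  (if st.2 < p then st.1.insert kc.2 (PySem.List.slice s (some (st.2 : Int)) (some (p : Int))) else st.1, p)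

def classify_a_alt (lista : List Int) : List (String × List Int) :=
  let s := PySem.List.sorted lista (fun x => x)
  let categories : List String := ["blue", "green", "red", "cyan", "magenta", "yellow", "black", "white"]
  ((PySem.List.enumerate categories 1).foldl (bStep s) (PySem.Dict.empty, 0)).1.items

-- ===== PRECONDITION & SPEC =====
def Spec_classify_a (lista : List Int) (out : List (String × List Int)) : Prop := out = classify_a_alt lista
instance (lista : List Int) (out : List (String × List Int)) : Decidable (Spec_classify_a lista out) := by unfold Spec_classify_a; infer_instance

-- ===== CLAIM (what is proved, stated in full; the proofs are below) =====
def Claim_equal_classify_a : Prop := ∀ (lista : List Int), Dom_classify_a lista → Spec_classify_a lista (classify_a lista)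

-- ===== LEMMAS AND PROOFS =====

-- A's inner loop over a run of elements it appends to a key it already holds only grows that key's list
lemma foldA_grow (cat : String) (u : List Int) :
    ∀ (d0 : PySem.Dict String (List Int)) (vs : List Int),
      u.foldl (aUpd cat) (d0.insert cat vs) = d0.insert cat (vs ++ u) := by
  induction u with
  | nil => simp
  | cons x u' ih =>
    intro d0 vs
    have h1 : aUpd cat (d0.insert cat vs) x = d0.insert cat (vs ++ [x]) := by
      simp [aUpd, PySem.Dict.contains_insert_self, PySem.Dict.modify,
        PySem.Dict.getD_insert_self, PySem.Dict.insert_insert_self]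
    simp only [List.foldl_cons, h1, ih]
    simp

-- A's inner loop over the bucket u of a fresh key cat: inserts u (or nothing if u is empty)
lemma foldA_bucket (cat : String) (u : List Int) (d : PySem.Dict String (List Int))
    (hd : d.contains cat = false) :
    u.foldl (aUpd cat) d = if u.isEmpty then d else d.insert cat u := by
  cases u with
  | nil => simp
  | cons x u' =>
    have h1 : aUpd cat d x = d.insert cat [x] := by simp [aUpd, hd]
    rw [List.foldl_cons, h1, foldA_grow cat u' d [x]]
    simp

-- main invariant: with l = prev and all of s[0:l] ≤ 45*j0, A's fold from (d, l) over categories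
-- enumerated from j0 and B's fold from (d, l) over the same categories enumerated from j0+1
-- build the same dict
lemma outer_eq (s : List Int) (hs : s.Pairwise (· ≤ ·)) (cats : List String) :
    ∀ (j0 : Int) (d : PySem.Dict String (List Int)) (l : Nat),
      l ≤ s.length →
      (∀ (i : Nat) (hi : i < s.length), i < l → s[i] ≤ 45 * j0) →
      (∀ c ∈ cats, d.contains c = false) →
      cats.Nodup →
      ((PySem.List.enumerate cats j0).foldl (aStep s) (d, (l : Int))).1
        = ((PySem.List.enumerate cats (j0 + 1)).foldl (bStep s) (d, l)).1 := by
  induction cats with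
  | nil => intro j0 d l _ _ _ _; simp [PySem.List.enumerate_nil]
  | cons cat cats' ih =>
    intro j0 d l hlen hl hfresh hnodup
    obtain ⟨hspec1, hspec2, hspec3⟩ := PySem.List.bisectRight_spec s (45 * (j0 + 1)) hs
    set c := PySem.List.bisectRight s (45 * (j0 + 1)) with hc
    -- l ≤ c
    have hlc : l ≤ c := by
      rcases Nat.lt_or_ge c l with h | h
      · exfalso
        have hcl : c < s.length := lt_of_lt_of_le h hlen
        have h1 : s[c] ≤ 45 * j0 := hl c hcl h
        have h2 : 45 * (j0 + 1) < s[c] := hspec3 c hcl le_rfl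
        omega
      · exact h
    -- the bucket
    set u : List Int := (s.drop l).take (c - l) with hu
    have hulen : u.length = c - l := by
      simp [hu]
      omega
    have hsplit : s.drop l = u ++ s.drop c := by
      have h1 : l + (c - l) = c := by omega
      conv_lhs => rw [← List.take_append_drop (c - l) (s.drop l)]
      rw [List.drop_drop, h1, hu]
    have hu_le : ∀ x ∈ u, x ≤ 45 * (j0 + 1) := by
      intro x hx
      obtain ⟨m, hm, hxe⟩ := List.mem_iff_getElem.mp hx
      have hm' : m < c - l := by omega
      have hlm : l + m < s.length := by omega
      have : u[m] = s[l + m] := by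
        simp only [hu, List.getElem_take, List.getElem_drop]
      rw [← hxe, this]
      exact hspec2 (l + m) hlm (by omega)
    have hv_gt : ∀ x ∈ s.drop c, ¬ x ≤ 45 * (j0 + 1) := by
      intro x hx
      obtain ⟨m, hm, hxe⟩ := List.mem_iff_getElem.mp hx
      have hcm : c + m < s.length := by
        have := List.length_drop (l := s) (i := c) ▸ hm
        omega
      have : (s.drop c)[m] = s[c + m] := by simp [List.getElem_drop]
      rw [← hxe, this]
      have := hspec3 (c + m) hcm (by omega)
      omega
    -- A's step from (d, l) lands on (bucket fold, c)
    have hA : aStep s (d, (l : Int)) (j0, cat) = (u.foldl (aUpd cat) d, (c : Int)) := by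
      unfold aStep
      rw [PySem.List.foldl_pyRange_pyGetD s 0
        (fun st2 x => if x ≤ 45 * (j0 + 1) then (aUpd cat st2.1 x, st2.2 + 1) else st2)
        (d, (l : Int)) (by positivity)]
      rw [Int.toNat_natCast, hsplit, List.foldl_append]
      rw [PySem.List.foldl_congr_mem u _
        (fun st2 x => (aUpd cat st2.1 x, st2.2 + 1)) _
        (by intro acc x hx; simp [hu_le x hx])]
      rw [PySem.List.foldl_prod_mk (aUpd cat) (fun acc _ => acc + 1)]
      rw [PySem.List.foldl_congr_mem (s.drop c) _ (fun st2 _ => st2) _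
        (by intro acc x hx; simp [hv_gt x hx])]
      rw [PySem.List.foldl_ignore]
      have hcount : u.foldl (fun acc _ => acc + 1) (l : Int) = (c : Int) := by
        rw [PySem.List.foldl_add (g := fun _ => (1 : Int)), PySem.List.sum_map_const_int, hulen]
        omega
      rw [hcount]
    -- B's step from (d, l) lands on the same dict and prev = c
    have hB : bStep s (d, l) (j0 + 1, cat) = (u.foldl (aUpd cat) d, c) := by
      unfold bStep
      simp only [← hc]
      rw [foldA_bucket cat u d (hfresh cat (by simp))]
      rw [PySem.List.slice_natCast s l c, ← hu]
      by_cases h : l < c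
      · have hue : u.isEmpty = false := by
          rw [Bool.eq_false_iff]
          intro he
          have := List.isEmpty_iff_length_eq_zero.mp he
          omega
        simp [h, hue]
      · have hue : u = [] := List.eq_nil_of_length_eq_zero (by omega)
        simp [h, hue]
    -- step both sides and apply the induction hypothesis
    rw [PySem.List.enumerate_cons, PySem.List.enumerate_cons, List.foldl_cons, List.foldl_cons,
      hA, hB]
    have hfresh' : ∀ c' ∈ cats', (u.foldl (aUpd cat) d).contains c' = false := by
      intro c' hc'
      rw [foldA_bucket cat u d (hfresh cat (by simp))]
      have hne : c' ≠ cat := by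
        rintro rfl
        exact (List.nodup_cons.mp hnodup).1 hc'
      by_cases h : u.isEmpty <;>
        simp [h, PySem.Dict.contains_insert, hne, hfresh c' (List.mem_cons_of_mem _ hc')]
    have hl' : ∀ (i : Nat) (hi : i < s.length), i < c → s[i] ≤ 45 * (j0 + 1) :=
      fun i hi hic => hspec2 i hi hic
    exact ih (j0 + 1) (u.foldl (aUpd cat) d) c hspec1 hl' hfresh' (List.nodup_cons.mp hnodup).2

-- ===== VERDICT (by name: the statement is the Claim_ definition above) =====
theorem classify_a_spec : Claim_equal_classify_a := by
  intro lista _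
  simp only [Spec_classify_a, classify_a, classify_a_alt]
  have hs : (PySem.List.sorted lista (fun x => x)).Pairwise (· ≤ ·) :=
    PySem.List.sorted_pairwise lista (fun x => x)
  have h := outer_eq (PySem.List.sorted lista (fun x => x)) hs
    ["blue", "green", "red", "cyan", "magenta", "yellow", "black", "white"]
    0 PySem.Dict.empty 0 (by simp) (by omega) (by simp [PySem.Dict.contains_empty]) (by decide)
  simp only [zero_add] at h
  simp only [Nat.cast_zero] at h
  rw [h]
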